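-- pv_equiv track=rewrite | github.com/SpikyClip/rosalind-solutions | bioinformatics_stronghold/IEV_calculating_expected_offspring.py | offspring_zygosity
-- ===== SOURCE A (Python) =====
-- import itertools as it
--
-- def offspring_zygosity(parent_1, parent_2):
--     """
--     return the ratio of homozygous dominant, heterozygous, and homozygous
--     recessive offspring given the genotype of both parents for a single
--     gene.
--     """
--     genotype_1, genotype_2 = tuple(parent_1), tuple(parent_2)
--     offspring = it.product(genotype_1, genotype_2)
--
--     homozygous_dominant, heterozygous, homozygous_recessive = 0, 0, 0
--
--     for allele_1, allele_2 in offspring: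
--         dominant = (allele_1.isupper(), allele_2.isupper())
--         if all(dominant):
--             homozygous_dominant += 1
--         elif not any(dominant):
--             homozygous_recessive += 1
--         else:
--             heterozygous += 1
--
--     return (homozygous_dominant, heterozygous, homozygous_recessive)
-- ===== SOURCE B (Python) =====
-- def offspring_zygosity(parent_1, parent_2):
--     up1 = sum(c.isupper() for c in parent_1)
--     up2 = sum(c.isupper() for c in parent_2)
--     lo1 = len(parent_1) - up1
--     lo2 = len(parent_2) - up2
--     return (up1 * up2, up1 * lo2 + lo1 * up2, lo1 * lo2)
-- ===== Notes on version B (the rewrite author's own statement) =====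
-- stated objective: faster
-- what changed: Replaces the loop over the Cartesian product of alleles with allele counts per parent and a closed-form Punnett factorization (up1*up2, up1*lo2+lo1*up2, lo1*lo2).
import Mathlib
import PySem

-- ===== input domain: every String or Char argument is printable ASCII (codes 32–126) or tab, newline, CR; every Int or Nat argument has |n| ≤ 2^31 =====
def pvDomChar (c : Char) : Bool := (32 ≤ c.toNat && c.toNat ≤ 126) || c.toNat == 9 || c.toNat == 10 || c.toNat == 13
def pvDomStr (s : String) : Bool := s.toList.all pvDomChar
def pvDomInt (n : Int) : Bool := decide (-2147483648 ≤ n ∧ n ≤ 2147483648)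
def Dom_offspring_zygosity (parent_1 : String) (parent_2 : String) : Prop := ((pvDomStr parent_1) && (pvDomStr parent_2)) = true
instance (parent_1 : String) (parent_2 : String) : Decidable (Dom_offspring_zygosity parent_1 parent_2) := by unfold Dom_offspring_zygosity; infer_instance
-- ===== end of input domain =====

-- B replaces A's loop over the Cartesian product of alleles by per-parent
-- uppercase counts and the closed-form Punnett factorization (objective: faster).

-- ===== PORT A =====
-- the loop body of A: classify one offspring pair and bump one counter
def pvStepA (acc : Int × Int × Int) (pr : Char × Char) : Int × Int × Int :=
  let d1 := PySem.Chars.isupper pr.1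
  let d2 := PySem.Chars.isupper pr.2
  if d1 && d2 then (acc.1 + 1, acc.2.1, acc.2.2)
  else if !(d1 || d2) then (acc.1, acc.2.1, acc.2.2 + 1)
  else (acc.1, acc.2.1 + 1, acc.2.2)

def offspring_zygosity (parent_1 : String) (parent_2 : String) : Int × Int × Int :=
  -- it.product(genotype_1, genotype_2) in row-major order, then the for-loop
  let offspring := parent_1.toList.flatMap (fun a => parent_2.toList.map (fun b => (a, b)))
  offspring.foldl pvStepA (0, 0, 0)

-- ===== PORT B =====
def pvUpCount (s : String) : Int :=
  ((s.toList.filter PySem.Chars.isupper).length : Int)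

def offspring_zygosity_alt (parent_1 : String) (parent_2 : String) : Int × Int × Int :=
  let up1 := pvUpCount parent_1
  let up2 := pvUpCount parent_2
  let lo1 := (parent_1.toList.length : Int) - up1
  let lo2 := (parent_2.toList.length : Int) - up2
  (up1 * up2, up1 * lo2 + lo1 * up2, lo1 * lo2)

-- ===== PRECONDITION & SPEC =====
def Spec_offspring_zygosity (parent_1 : String) (parent_2 : String) (out : Int × Int × Int) : Prop := out = offspring_zygosity_alt parent_1 parent_2
instance (parent_1 : String) (parent_2 : String) (out : Int × Int × Int) : Decidable (Spec_offspring_zygosity parent_1 parent_2 out) := by unfold Spec_offspring_zygosity; infer_instance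

-- ===== CLAIM (what is proved, stated in full; the proofs are below) =====
def Claim_equal_offspring_zygosity : Prop := ∀ (parent_1 : String) (parent_2 : String), Dom_offspring_zygosity parent_1 parent_2 → Spec_offspring_zygosity parent_1 parent_2 (offspring_zygosity parent_1 parent_2)

-- ===== LEMMAS AND PROOFS =====
-- uppercase / lowercase counts of a character list, as integers
def pvUpL (l : List Char) : Int := ((l.filter PySem.Chars.isupper).length : Int)

theorem pvUpL_cons (c : Char) (l : List Char) :
    pvUpL (c :: l) = (if PySem.Chars.isupper c then 1 else 0) + pvUpL l := by
  by_cases h : PySem.Chars.isupper c <;> simp [pvUpL, h, add_comm]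

-- one row of the product: fold over one row [(a,b) for b in l2] starting from acc
theorem pvRow (a : Char) (l2 : List Char) (acc : Int × Int × Int) :
    (l2.map (fun b => (a, b))).foldl pvStepA acc =
      if PySem.Chars.isupper a then
        (acc.1 + pvUpL l2, acc.2.1 + ((l2.length : Int) - pvUpL l2), acc.2.2)
      else
        (acc.1, acc.2.1 + pvUpL l2, acc.2.2 + ((l2.length : Int) - pvUpL l2)) := by
  induction l2 generalizing acc with
  | nil => simp [pvUpL]
  | cons b t ih =>
    simp only [List.map_cons, List.foldl_cons, pvStepA, pvUpL_cons, List.length_cons]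
    by_cases h1 : PySem.Chars.isupper a <;> by_cases h2 : PySem.Chars.isupper b <;>
      simp [h1, h2, ih, Prod.ext_iff] <;> (try push_cast) <;> (try constructor) <;> (try constructor) <;> (try linarith)

-- full product fold starting from acc
theorem pvFull (l1 l2 : List Char) (acc : Int × Int × Int) :
    (l1.flatMap (fun a => l2.map (fun b => (a, b)))).foldl pvStepA acc =
      (acc.1 + pvUpL l1 * pvUpL l2,
       acc.2.1 + pvUpL l1 * ((l2.length : Int) - pvUpL l2)
               + ((l1.length : Int) - pvUpL l1) * pvUpL l2,
       acc.2.2 + ((l1.length : Int) - pvUpL l1) * ((l2.length : Int) - pvUpL l2)) := by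
  induction l1 generalizing acc with
  | nil => simp [pvUpL]
  | cons a t ih =>
    simp only [List.flatMap_cons, List.foldl_append, pvRow, ih, pvUpL_cons, List.length_cons]
    by_cases h : PySem.Chars.isupper a <;>
      simp only [h, if_true, if_false, Prod.mk.injEq] <;>
      push_cast <;>
      refine ⟨by ring, by ring, by ring⟩

-- ===== VERDICT (by name: the statement is the Claim_ definition above) =====
theorem offspring_zygosity_spec : Claim_equal_offspring_zygosity := by
  intro p1 p2 _
  show _ = _
  simp only [offspring_zygosity, offspring_zygosity_alt, pvUpCount]
  rw [pvFull]
  simp [pvUpL]
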